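-- pv_equiv track=rewrite | github.com/alexiabl/au_ml18 | handin3/Handin3_Class1_14/handin3_try2.py | translate_path_to_indices
-- ===== SOURCE A (Python) =====
-- def translate_path_to_indices(path):
--     #return list(map(lambda x: int(x), path))
--     sequence = list(path)
--     index=0
--     indices = []
--     for c,i in enumerate(path):
--         prev_index=index
--         if i=='N':
--             index = 3
--         elif i=='C':
--             if prev_index == 3:
--                 index = 2
--             elif prev_index == 2:
--                 index = 1
--             elif prev_index == 1:
--                 index = 0
--             elif prev_index == 0:
--                 index = 2
--         elif i=='R':
--             if prev_index == 3:
--                 index = 4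
--             elif prev_index == 4:
--                 index = 5
--             elif prev_index == 5:
--                 index = 6
--             elif prev_index == 6:
--                 index = 4
--         indices.append(index)
--     assert len(indices) == len(sequence)
--     return indices
-- ===== SOURCE B (Python) =====
-- C_VALS = [2, 1, 0]
-- R_VALS = [4, 5, 6]
--
-- def translate_path_to_indices(path):
--     # Segment view: an 'N' resets the state to 3; within a segment only the
--     # first of 'C'/'R' picks a branch and only that letter advances a 3-cycle,
--     # so every output value is a closed form of a running count.
--     segs = path.split('N')
--     out = []
--     c = 0
--     for ch in segs[0]:
--         if ch == 'C':
--             c += 1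
--         out.append(0 if c == 0 else C_VALS[(c - 1) % 3])
--     for seg in segs[1:]:
--         out.append(3)
--         branch = None
--         m = 0
--         for ch in seg:
--             if branch is None and (ch == 'C' or ch == 'R'):
--                 branch = ch
--             if ch == branch:
--                 m += 1
--             out.append(3 if m == 0 else (C_VALS if branch == 'C' else R_VALS)[(m - 1) % 3])
--     return out
-- ===== Notes on version B (the rewrite author's own statement) =====
-- stated objective: alternative
-- what changed: Replaced the per-character state machine by a segment decomposition: split the path on the reset letter N, detect each segment's single effective branch letter (C or R), and compute every output as a closed-form 3-cycle value of a running count of that letter.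
import Mathlib
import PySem

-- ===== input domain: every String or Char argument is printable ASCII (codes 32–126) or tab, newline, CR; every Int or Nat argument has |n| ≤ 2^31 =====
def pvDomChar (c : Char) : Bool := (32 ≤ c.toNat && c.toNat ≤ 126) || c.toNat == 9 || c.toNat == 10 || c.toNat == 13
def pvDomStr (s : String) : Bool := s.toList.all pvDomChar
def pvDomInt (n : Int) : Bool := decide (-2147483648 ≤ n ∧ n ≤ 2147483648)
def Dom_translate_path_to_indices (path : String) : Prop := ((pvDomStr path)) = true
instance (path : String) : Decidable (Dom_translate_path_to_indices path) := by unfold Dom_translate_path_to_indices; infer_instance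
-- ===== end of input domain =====

-- B replaces A's per-character state machine by a segment decomposition: split the
-- path on 'N', detect each segment's branch letter, and obtain every output value
-- as a closed-form 3-cycle of a running count of that letter (objective: alternative).

-- ===== PORT A =====
-- Literal port of A: the loop counter c from `enumerate(path)` is unused, so the
-- fold runs over the characters; state = (index, indices), append at each step.
-- The final `assert len(indices) == len(sequence)` always holds (one append per char).
def translate_path_to_indices (path : String) : List Int :=
  (path.toList.foldl
    (fun (st : Int × List Int) (i : Char) =>
      let prev_index := st.1
      let index : Int :=
        if i = 'N' then 3
        else if i = 'C' then
          (if prev_index = 3 then 2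
           else if prev_index = 2 then 1
           else if prev_index = 1 then 0
           else if prev_index = 0 then 2
           else prev_index)
        else if i = 'R' then
          (if prev_index = 3 then 4
           else if prev_index = 4 then 5
           else if prev_index = 5 then 6
           else if prev_index = 6 then 4
           else prev_index)
        else prev_index
      (index, st.2 ++ [index]))
    (0, [])).2

-- ===== PORT B =====
-- Module-level tables C_VALS / R_VALS of Source B.
def pvCVals : List Int := [2, 1, 0]
def pvRVals : List Int := [4, 5, 6]

-- Source B's loop-body expressions, named step for step:
-- `c + 1 if ch == 'C' else c`
def pvFC (c : Nat) (ch : Char) : Nat := if ch = 'C' then c + 1 else c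
-- `0 if c == 0 else C_VALS[(c - 1) % 3]`
def pvFVal (c : Nat) : Int := if c = 0 then 0 else pvCVals[(c - 1) % 3]!
-- `if branch is None and (ch == 'C' or ch == 'R'): branch = ch`
def pvGBr (br : Option Char) (ch : Char) : Option Char :=
  if br = none ∧ (ch = 'C' ∨ ch = 'R') then some ch else br
-- `if ch == branch: m += 1`
def pvGM (br : Option Char) (ch : Char) (m : Nat) : Nat :=
  if some ch = br then m + 1 else m
-- `3 if m == 0 else (C_VALS if branch == 'C' else R_VALS)[(m - 1) % 3]`
def pvGVal (br : Option Char) (m : Nat) : Int :=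
  if m = 0 then 3 else (if br = some 'C' then pvCVals else pvRVals)[(m - 1) % 3]!

-- Port of Source B: split on 'N'; the leading segment counts 'C's from state 0; each
-- later segment appends 3 for its 'N', detects its branch letter and counts it.
-- The outer `match`'s [] arm is an unreachable totality guard (a split is never
-- empty); Source B's segs[0] likewise always exists.
def translate_path_to_indices_alt (path : String) : List Int :=
  match PySem.Chars.splitOn path.toList ['N'] with
  | [] => []
  | s0 :: rest =>
    let st0 := s0.foldl
      (fun (st : Nat × List Int) (ch : Char) =>
        let c := pvFC st.1 ch
        (c, st.2 ++ [pvFVal c]))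
      (0, ([] : List Int))
    rest.foldl
      (fun (out : List Int) (seg : List Char) =>
        (seg.foldl
          (fun (st : Option Char × Nat × List Int) (ch : Char) =>
            let branch := pvGBr st.1 ch
            let m := pvGM branch ch st.2.1
            (branch, m, st.2.2 ++ [pvGVal branch m]))
          (none, 0, out ++ [3])).2.2)
      st0.2

-- ===== PRECONDITION & SPEC =====
def Spec_translate_path_to_indices (path : String) (out : List Int) : Prop := out = translate_path_to_indices_alt path
instance (path : String) (out : List Int) : Decidable (Spec_translate_path_to_indices path out) := by unfold Spec_translate_path_to_indices; infer_instance

-- ===== CLAIM (what is proved, stated in full; the proofs are below) =====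
def Claim_equal_translate_path_to_indices : Prop := ∀ (path : String), Dom_translate_path_to_indices path → Spec_translate_path_to_indices path (translate_path_to_indices path)

-- ===== LEMMAS AND PROOFS =====

-- A's transition function, extracted.
def pvStepA (s : Int) (i : Char) : Int :=
  if i = 'N' then 3
  else if i = 'C' then
    (if s = 3 then 2 else if s = 2 then 1 else if s = 1 then 0 else if s = 0 then 2 else s)
  else if i = 'R' then
    (if s = 3 then 4 else if s = 4 then 5 else if s = 5 then 6 else if s = 6 then 4 else s)
  else s

-- The list of states A emits, as a scan.
def pvScanA : List Char → Int → List Int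
  | [], _ => []
  | c :: t, s => pvStepA s c :: pvScanA t (pvStepA s c)

theorem pvFoldA_eq (l : List Char) (s : Int) (out : List Int) :
    l.foldl
      (fun (st : Int × List Int) (i : Char) =>
        let prev_index := st.1
        let index : Int :=
          if i = 'N' then 3
          else if i = 'C' then
            (if prev_index = 3 then 2
             else if prev_index = 2 then 1
             else if prev_index = 1 then 0
             else if prev_index = 0 then 2
             else prev_index)
          else if i = 'R' then
            (if prev_index = 3 then 4
             else if prev_index = 4 then 5
             else if prev_index = 5 then 6
             else if prev_index = 6 then 4
             else prev_index)
          else prev_index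
        (index, st.2 ++ [index])) (s, out)
    = (l.foldl pvStepA s, out ++ pvScanA l s) := by
  induction l generalizing s out with
  | nil => simp [pvScanA]
  | cons c t ih => simp [pvScanA, ih, pvStepA]

-- Reference splitter: what Python's split('N') produces, structurally.
def pvSplit : List Char → List (List Char)
  | [] => [[]]
  | c :: t =>
    if c = 'N' then [] :: pvSplit t
    else (c :: (pvSplit t).headD []) :: (pvSplit t).tail

theorem pvSplit_ne_nil (l : List Char) : pvSplit l ≠ [] := by
  cases l with
  | nil => simp [pvSplit]
  | cons c t => by_cases h : c = 'N' <;> simp [pvSplit, h]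

theorem pvSplit_cons (l : List Char) : ∃ s0 rest, pvSplit l = s0 :: rest := by
  cases hsp : pvSplit l with
  | nil => exact absurd hsp (pvSplit_ne_nil l)
  | cons a b => exact ⟨a, b, rfl⟩

theorem pvGo_spec (l : List Char) (fuel : Nat) (cur : List Char) (acc : List (List Char))
    (h : l.length ≤ fuel) :
    PySem.Chars.splitOn.go ['N'] fuel l cur acc
      = acc.reverse ++ ((cur.reverse ++ (pvSplit l).headD []) :: (pvSplit l).tail) := by
  induction l generalizing fuel cur acc with
  | nil =>
    cases fuel with
    | zero => rw [PySem.Chars.splitOn.go.eq_def]; simp [pvSplit]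
    | succ f => rw [PySem.Chars.splitOn.go.eq_def]; simp [pvSplit]
  | cons c t ih =>
    cases fuel with
    | zero => simp at h
    | succ f =>
      by_cases hc : c = 'N'
      · subst hc
        rw [PySem.Chars.splitOn.go.eq_def]
        simp only [List.isPrefixOf, BEq.rfl, Bool.true_and, if_pos]
        have hd : List.drop (['N'].length) ('N' :: t) = t := rfl
        rw [hd, ih f [] _ (by simpa using h)]
        obtain ⟨s0, rest, hsp⟩ := pvSplit_cons t
        simp [pvSplit, hsp]
      · rw [PySem.Chars.splitOn.go.eq_def]
        have hpre : (['N'].isPrefixOf (c :: t)) = false := by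
          simp [List.isPrefixOf]; exact fun hc' => absurd hc'.symm hc
        simp only [hpre, Bool.false_eq_true, if_neg, not_false_iff]
        rw [ih f (c :: cur) acc (by simpa using h)]
        simp [pvSplit, hc]

theorem pvSplitOn_eq (l : List Char) :
    PySem.Chars.splitOn l ['N'] = pvSplit l := by
  unfold PySem.Chars.splitOn
  rw [pvGo_spec l (l.length + 1) [] [] (by omega)]
  obtain ⟨s0, rest, hsp⟩ := pvSplit_cons l
  simp [hsp]

-- B's per-segment value scans, extracted.
def pvFSeq : List Char → Nat → List Int
  | [], _ => []
  | ch :: t, c => pvFVal (pvFC c ch) :: pvFSeq t (pvFC c ch)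

def pvGSeq : List Char → Option Char → Nat → List Int
  | [], _, _ => []
  | ch :: t, br, m =>
    pvGVal (pvGBr br ch) (pvGM (pvGBr br ch) ch m)
      :: pvGSeq t (pvGBr br ch) (pvGM (pvGBr br ch) ch m)

theorem pvFoldB1_eq (l : List Char) (c : Nat) (out : List Int) :
    l.foldl
      (fun (st : Nat × List Int) (ch : Char) =>
        let c := pvFC st.1 ch
        (c, st.2 ++ [pvFVal c])) (c, out)
    = (l.foldl pvFC c, out ++ pvFSeq l c) := by
  induction l generalizing c out with
  | nil => simp [pvFSeq]
  | cons ch t ih => simp [pvFSeq, ih]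

theorem pvFoldB2_eq (l : List Char) (br : Option Char) (m : Nat) (out : List Int) :
    (l.foldl
      (fun (st : Option Char × Nat × List Int) (ch : Char) =>
        let branch := pvGBr st.1 ch
        let m := pvGM branch ch st.2.1
        (branch, m, st.2.2 ++ [pvGVal branch m]))
      (br, m, out)).2.2
    = out ++ pvGSeq l br m := by
  induction l generalizing br m out with
  | nil => simp [pvGSeq]
  | cons ch t ih => simp [pvGSeq, ih]

-- Invariant for after-'N' mode: no branch yet (count 0) or branch 'C'/'R' (count ≥ 1).
def pvValid (br : Option Char) (m : Nat) : Prop :=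
  (br = none ∧ m = 0) ∨ (br = some 'C' ∧ 1 ≤ m) ∨ (br = some 'R' ∧ 1 ≤ m)

theorem pvStepA_N (s : Int) : pvStepA s 'N' = 3 := by simp [pvStepA]

theorem pvStepA_other (s : Int) (ch : Char) (hN : ch ≠ 'N') (hC : ch ≠ 'C') (hR : ch ≠ 'R') :
    pvStepA s ch = s := by simp [pvStepA, hN, hC, hR]

theorem pvStepA_R_low (s : Int) (h : s = 0 ∨ s = 1 ∨ s = 2) : pvStepA s 'R' = s := by
  rcases h with h | h | h <;> subst h <;> decide

theorem pvStepA_C_high (s : Int) (h : s = 4 ∨ s = 5 ∨ s = 6) : pvStepA s 'C' = s := by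
  rcases h with h | h | h <;> subst h <;> decide

theorem pvGVal_C (m : Nat) (hm : 1 ≤ m) :
    pvGVal (some 'C') m = pvCVals[(m - 1) % 3]! := by
  unfold pvGVal
  rw [if_neg (by omega : ¬ m = 0), if_pos rfl]

theorem pvGVal_R (m : Nat) (hm : 1 ≤ m) :
    pvGVal (some 'R') m = pvRVals[(m - 1) % 3]! := by
  unfold pvGVal
  rw [if_neg (by omega : ¬ m = 0), if_neg (by decide)]

theorem pvCVals_mem (m : Nat) (hm : 1 ≤ m) :
    pvCVals[(m - 1) % 3]! = 0 ∨ pvCVals[(m - 1) % 3]! = 1 ∨ pvCVals[(m - 1) % 3]! = 2 := by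
  have h3 : (m - 1) % 3 = 0 ∨ (m - 1) % 3 = 1 ∨ (m - 1) % 3 = 2 := by omega
  rcases h3 with h | h | h <;> rw [h] <;> simp [pvCVals]

theorem pvRVals_mem (m : Nat) (hm : 1 ≤ m) :
    pvRVals[(m - 1) % 3]! = 4 ∨ pvRVals[(m - 1) % 3]! = 5 ∨ pvRVals[(m - 1) % 3]! = 6 := by
  have h3 : (m - 1) % 3 = 0 ∨ (m - 1) % 3 = 1 ∨ (m - 1) % 3 = 2 := by omega
  rcases h3 with h | h | h <;> rw [h] <;> simp [pvRVals]

-- advancing the C-cycle / R-cycle by one step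
theorem pvStepA_C_adv (m : Nat) (hm : 1 ≤ m) :
    pvStepA (pvCVals[(m - 1) % 3]!) 'C' = pvCVals[(m + 1 - 1) % 3]! := by
  have hm3 : (m + 1 - 1) % 3 = ((m - 1) % 3 + 1) % 3 := by omega
  have h3 : (m - 1) % 3 = 0 ∨ (m - 1) % 3 = 1 ∨ (m - 1) % 3 = 2 := by omega
  rcases h3 with h | h | h <;> rw [hm3, h] <;> simp [pvCVals, pvStepA]

theorem pvStepA_R_adv (m : Nat) (hm : 1 ≤ m) :
    pvStepA (pvRVals[(m - 1) % 3]!) 'R' = pvRVals[(m + 1 - 1) % 3]! := by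
  have hm3 : (m + 1 - 1) % 3 = ((m - 1) % 3 + 1) % 3 := by omega
  have h3 : (m - 1) % 3 = 0 ∨ (m - 1) % 3 = 1 ∨ (m - 1) % 3 = 2 := by omega
  rcases h3 with h | h | h <;> rw [hm3, h] <;> simp [pvRVals, pvStepA]

-- The crux: A's transition agrees with B's closed-form update, after an 'N'.
theorem pvStepB_after (br : Option Char) (m : Nat) (hv : pvValid br m) (ch : Char)
    (hch : ch ≠ 'N') :
    pvStepA (pvGVal br m) ch = pvGVal (pvGBr br ch) (pvGM (pvGBr br ch) ch m)
      ∧ pvValid (pvGBr br ch) (pvGM (pvGBr br ch) ch m) := by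
  rcases hv with ⟨hbr, hm⟩ | ⟨hbr, hm⟩ | ⟨hbr, hm⟩
  · subst hbr; subst hm
    by_cases hC : ch = 'C'
    · subst hC
      refine ⟨?_, ?_⟩
      · simp [pvGVal, pvGBr, pvGM, pvStepA, pvCVals]
      · simp [pvValid, pvGBr, pvGM]
    · by_cases hR : ch = 'R'
      · subst hR
        refine ⟨?_, ?_⟩
        · simp [pvGVal, pvGBr, pvGM, pvStepA, pvRVals]
        · simp [pvValid, pvGBr, pvGM]
      · refine ⟨?_, ?_⟩
        · simp [pvGVal, pvGBr, pvGM, pvStepA, hC, hR, hch]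
        · simp [pvValid, pvGBr, pvGM, hC, hR]
  · subst hbr
    have hbr' : pvGBr (some 'C') ch = some 'C' := by simp [pvGBr]
    rw [hbr']
    by_cases hC : ch = 'C'
    · subst hC
      have hm' : pvGM (some 'C') 'C' m = m + 1 := by simp [pvGM]
      rw [hm']
      refine ⟨?_, Or.inr (Or.inl ⟨rfl, by omega⟩)⟩
      rw [pvGVal_C m hm, pvGVal_C (m + 1) (by omega)]
      exact pvStepA_C_adv m hm
    · have hm' : pvGM (some 'C') ch m = m := by simp [pvGM, hC]
      rw [hm']
      refine ⟨?_, Or.inr (Or.inl ⟨rfl, hm⟩)⟩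
      rw [pvGVal_C m hm]
      by_cases hR : ch = 'R'
      · subst hR; exact pvStepA_R_low _ (pvCVals_mem m hm)
      · exact pvStepA_other _ ch hch hC hR
  · subst hbr
    have hbr' : pvGBr (some 'R') ch = some 'R' := by simp [pvGBr]
    rw [hbr']
    by_cases hR : ch = 'R'
    · subst hR
      have hm' : pvGM (some 'R') 'R' m = m + 1 := by simp [pvGM]
      rw [hm']
      refine ⟨?_, Or.inr (Or.inr ⟨rfl, by omega⟩)⟩
      rw [pvGVal_R m hm, pvGVal_R (m + 1) (by omega)]
      exact pvStepA_R_adv m hm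
    · have hm' : pvGM (some 'R') ch m = m := by simp [pvGM, hR]
      rw [hm']
      refine ⟨?_, Or.inr (Or.inr ⟨rfl, hm⟩)⟩
      rw [pvGVal_R m hm]
      by_cases hC : ch = 'C'
      · subst hC; exact pvStepA_C_high _ (pvRVals_mem m hm)
      · exact pvStepA_other _ ch hch hC hR

-- first-segment update: A's transition through the C-count encoding
theorem pvStepB_first (c : Nat) (ch : Char) (hch : ch ≠ 'N') :
    pvStepA (pvFVal c) ch = pvFVal (pvFC c ch) := by
  by_cases hC : ch = 'C'
  · subst hC
    rw [show pvFC c 'C' = c + 1 from by simp [pvFC]]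
    by_cases hc : c = 0
    · subst hc; decide
    · have hc1 : 1 ≤ c := by omega
      unfold pvFVal
      rw [if_neg hc, if_neg (by omega : ¬ c + 1 = 0)]
      exact pvStepA_C_adv c hc1
  · rw [show pvFC c ch = c from by simp [pvFC, hC]]
    unfold pvFVal
    by_cases hc : c = 0
    · subst hc
      rw [if_pos rfl]
      by_cases hR : ch = 'R'
      · subst hR; decide
      · exact pvStepA_other _ ch hch hC hR
    · rw [if_neg hc]
      by_cases hR : ch = 'R'
      · subst hR; exact pvStepA_R_low _ (pvCVals_mem c (by omega))
      · exact pvStepA_other _ ch hch hC hR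

-- The after-'N' half of the main correspondence.
theorem pvScanA_G (l : List Char) (br : Option Char) (m : Nat) (hv : pvValid br m) :
    pvScanA l (pvGVal br m)
      = pvGSeq ((pvSplit l).headD []) br m
        ++ ((pvSplit l).tail).flatMap (fun seg => 3 :: pvGSeq seg none 0) := by
  induction l generalizing br m with
  | nil => simp [pvScanA, pvSplit, pvGSeq]
  | cons ch t ih =>
    by_cases hN : ch = 'N'
    · subst hN
      have h0 : pvStepA (pvGVal br m) 'N' = pvGVal none 0 := by
        rw [pvStepA_N]; simp [pvGVal]
      rw [pvScanA, h0, ih none 0 (Or.inl ⟨rfl, rfl⟩)]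
      obtain ⟨s0, rest, hsp⟩ := pvSplit_cons t
      simp [pvSplit, hsp, pvGSeq, pvGVal]
    · obtain ⟨hstep, hv'⟩ := pvStepB_after br m hv ch hN
      rw [pvScanA, hstep, ih _ _ hv']
      simp [pvSplit, hN, pvGSeq]

-- The leading-segment half of the main correspondence.
theorem pvScanA_F (l : List Char) (c : Nat) :
    pvScanA l (pvFVal c)
      = pvFSeq ((pvSplit l).headD []) c
        ++ ((pvSplit l).tail).flatMap (fun seg => 3 :: pvGSeq seg none 0) := by
  induction l generalizing c with
  | nil => simp [pvScanA, pvSplit, pvFSeq]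
  | cons ch t ih =>
    by_cases hN : ch = 'N'
    · subst hN
      have h0 : pvStepA (pvFVal c) 'N' = pvGVal none 0 := by
        rw [pvStepA_N]; simp [pvGVal]
      rw [pvScanA, h0, pvScanA_G t none 0 (Or.inl ⟨rfl, rfl⟩)]
      obtain ⟨s0, rest, hsp⟩ := pvSplit_cons t
      simp [pvSplit, hsp, pvFSeq, pvGVal]
    · rw [pvScanA, pvStepB_first c ch hN, ih _]
      simp [pvSplit, hN, pvFSeq]

-- The outer loop of B accumulates one 3-prefixed block per later segment.
theorem pvFoldB_outer (rest : List (List Char)) (out : List Int) :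
    rest.foldl
      (fun (out : List Int) (seg : List Char) =>
        (seg.foldl
          (fun (st : Option Char × Nat × List Int) (ch : Char) =>
            let branch := pvGBr st.1 ch
            let m := pvGM branch ch st.2.1
            (branch, m, st.2.2 ++ [pvGVal branch m]))
          (none, 0, out ++ [3])).2.2)
      out
    = out ++ rest.flatMap (fun seg => 3 :: pvGSeq seg none 0) := by
  induction rest generalizing out with
  | nil => simp
  | cons seg rs ih => simp [List.foldl_cons, pvFoldB2_eq, List.flatMap_def]

-- ===== VERDICT (by name: the statement is the Claim_ definition above) =====
theorem translate_path_to_indices_spec : Claim_equal_translate_path_to_indices := by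
  intro path _
  unfold Spec_translate_path_to_indices translate_path_to_indices translate_path_to_indices_alt
  rw [pvFoldA_eq, pvSplitOn_eq]
  obtain ⟨s0, rest, hsp⟩ := pvSplit_cons path.toList
  rw [hsp]
  simp only [pvFoldB1_eq, pvFoldB_outer]
  have h0 : (0 : Int) = pvFVal 0 := by simp [pvFVal]
  rw [h0, pvScanA_F path.toList 0, hsp]
  simp
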